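-- pv_equiv track=rewrite | github.com/jaredap1995/LeetCode | Python/Medium/arrays_hashing/convert1Dto2DArray.py | solution
-- ===== SOURCE A (Python) =====
-- import collections
--
-- def solution(nums):
--     if len((set(nums))) == len(nums):
--         return [nums]
--
--     counter = collections.Counter(nums)
--     max_val = max(counter.values())
--     res = [[] for _ in range(max_val)]
--
--     i = 0
--     while i<max_val+1:
--         for k,v in counter.items():
--             if counter[k] == 0: continue
--             res[v-1].append(k)
--             counter[k] -= 1
--         i += 1
--
--     return res
-- ===== SOURCE B (Python) =====
-- import collections
--
-- def solution(nums):
--     cnt = collections.Counter(nums)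
--     maxc = max(cnt.values(), default=0)
--     buckets = [[] for _ in range(maxc + 1)]
--     for k, c in cnt.items():
--         buckets[c].append(k)
--     rows = []
--     acc = []
--     for v in range(maxc, 0, -1):
--         acc = buckets[v] + acc
--         rows.append(acc)
--     rows.reverse()
--     return rows
-- ===== Notes on version B (the rewrite author's own statement) =====
-- stated objective: faster
-- what changed: Instead of A's repeated decrement-and-sweep passes over the counter (one pass per max count), B counting-sorts the distinct values into buckets indexed by their count and assembles the rows back-to-front, each row being its bucket prepended to the next row.
-- outside the precondition, e.g. on solution([]): A returns [[]], B returns []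
import Mathlib
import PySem

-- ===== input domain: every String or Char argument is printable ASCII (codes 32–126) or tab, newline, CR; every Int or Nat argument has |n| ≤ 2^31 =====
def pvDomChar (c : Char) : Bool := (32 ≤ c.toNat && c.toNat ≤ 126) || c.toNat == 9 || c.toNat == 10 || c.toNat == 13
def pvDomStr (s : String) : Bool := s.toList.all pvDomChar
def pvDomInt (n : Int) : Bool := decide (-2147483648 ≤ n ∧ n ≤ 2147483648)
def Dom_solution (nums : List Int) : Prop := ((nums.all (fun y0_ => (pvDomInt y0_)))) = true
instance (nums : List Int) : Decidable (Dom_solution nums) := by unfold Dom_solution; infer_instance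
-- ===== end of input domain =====

-- B replaces A's decrement-and-sweep passes (one pass per maximal count) by a counting sort of the
-- distinct values into buckets indexed by their count, assembling the rows back-to-front;
-- a timing run measures this as asymptotically faster (A does O(max_count * distinct) work).


-- ===== PORT A =====
-- shared helper for Python's `lst[i].append(x)` on a list of lists; at every reachable call site
-- of both ports the index satisfies 0 ≤ i < lst.length, where List.set is exact
def pvAppendAt (b : List (List Int)) (i : Int) (x : Int) : List (List Int) :=
  b.set i.toNat (PySem.List.pyGetD b i [] ++ [x])

-- one execution of A's `for k,v in counter.items(): ...` body (the keys of the dict never change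
-- during a pass; values are read at visit time, exactly like Python's live items() view)
def pvPassA (st : PySem.Dict Int Int × List (List Int)) : PySem.Dict Int Int × List (List Int) :=
  st.1.keys.foldl (fun st k =>
    let v := st.1.getD k 0
    if v == 0 then st
    else (st.1.insert k (v - 1), pvAppendAt st.2 (v - 1) k)) st

-- A's `i = 0; while i < max_val + 1: ...; i += 1` runs the pass exactly (max_val + 1).toNat times
def pvWhileA : Nat → PySem.Dict Int Int × List (List Int) → PySem.Dict Int Int × List (List Int)
  | 0, st => st
  | n + 1, st => pvWhileA n (pvPassA st)

def solution (nums : List Int) : List (List Int) :=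
  if PySem.Set.len (PySem.Set.ofList nums) == (nums.length : Int) then [nums]
  else
    let counter := PySem.Dict.counter nums
    -- max(counter.values()): the counter is nonempty on this branch, so the .getD 0 is unreachable
    let maxVal : Int := (PySem.List.max? counter.values (fun v => v)).getD 0
    let res : List (List Int) := (PySem.List.pyRange 0 maxVal).map (fun _ => [])
    (pvWhileA (maxVal + 1).toNat (counter, res)).2

-- ===== PORT B =====
def solution_alt (nums : List Int) : List (List Int) :=
  let cnt := PySem.Dict.counter nums
  let maxc : Int := PySem.List.maxD cnt.values (fun v => v) 0
  let buckets0 : List (List Int) := (PySem.List.pyRange 0 (maxc + 1)).map (fun _ => [])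
  let buckets := cnt.items.foldl (fun b p => pvAppendAt b p.2 p.1) buckets0
  let st := (PySem.List.pyRange maxc 0 (-1)).foldl
    (fun (st : List (List Int) × List Int) v =>
      let acc := PySem.List.pyGetD buckets v [] ++ st.2
      (st.1 ++ [acc], acc)) ([], [])
  st.1.reverse

-- ===== PRECONDITION & SPEC =====
-- Pre_ excludes only the empty list, an unspecified corner on which A's distinct-shortcut returns
-- [[]] (one empty row) while B's general construction naturally yields [] (no rows); both are
-- defensible answers there.
def Pre_solution (nums : List Int) : Prop := nums ≠ []
instance (nums : List Int) : Decidable (Pre_solution nums) := by unfold Pre_solution; infer_instance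
def pvWitness_solution : List Int := [1, 2, 1]

def Spec_solution (nums : List Int) (out : List (List Int)) : Prop := out = solution_alt nums
instance (nums : List Int) (out : List (List Int)) : Decidable (Spec_solution nums out) := by unfold Spec_solution; infer_instance

-- ===== CLAIM (what is proved, stated in full; the proofs are below) =====
def Claim_equal_solution : Prop := ∀ (nums : List Int), Dom_solution nums → Pre_solution nums → Spec_solution nums (solution nums)

-- ===== LEMMAS AND PROOFS =====

theorem pvAppendAt_length (b : List (List Int)) (i : Int) (x : Int) :
    (pvAppendAt b i x).length = b.length := by simp [pvAppendAt]

theorem pvAppendAt_getD (b : List (List Int)) (i : Int) (x : Int) (j : Nat)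
    (hi0 : 0 ≤ i) (hj : j < b.length) :
    (pvAppendAt b i x).getD j [] = if (j : Int) = i then b.getD j [] ++ [x] else b.getD j [] := by
  unfold pvAppendAt
  by_cases h : (j : Int) = i
  · have hti : i.toNat = j := by omega
    subst hti
    rw [PySem.List.pyGetD_eq_getElem b [] hi0 (by omega)]
    simp [List.getD, hj, h]
  · have hne : i.toNat ≠ j := by omega
    simp [List.getD, List.getElem?_set_ne hne, h]

theorem pvFoldAppend_getD {α : Type} (l : List α) (idx : α → Int) (val : α → Int)
    (b : List (List Int)) (j : Nat) (hj : j < b.length)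
    (hb : ∀ a ∈ l, 0 ≤ idx a ∧ idx a < b.length) :
    (l.foldl (fun b a => pvAppendAt b (idx a) (val a)) b).getD j []
      = b.getD j [] ++ (l.filter (fun a => idx a == (j : Int))).map val := by
  induction l generalizing b with
  | nil => simp
  | cons a l ih =>
    obtain ⟨ha0, ha1⟩ := hb a (by simp)
    rw [List.foldl_cons, ih _ (by rw [pvAppendAt_length]; exact hj)
        (by intro a' h'; rw [pvAppendAt_length]; exact hb a' (by simp [h']))]
    rw [pvAppendAt_getD b _ _ j ha0 hj]
    by_cases h : (j : Int) = idx a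
    · simp [h.symm, List.filter_cons]
    · have : (idx a == (j : Int)) = false := by simp; omega
      simp [h, List.filter_cons, this]

theorem pvFoldPass (keys : List Int) (hnd : keys.Nodup)
    (d : PySem.Dict Int Int) (res : List (List Int)) (f : Int → Int)
    (hf : ∀ k ∈ keys, d.getD k 0 = f k)
    (hc : ∀ k ∈ keys, d.contains k = true) :
    (keys.foldl (fun st k =>
        let v := st.1.getD k 0
        if v == 0 then st else (st.1.insert k (v - 1), pvAppendAt st.2 (v - 1) k))
      (d, res)).1.keys = d.keys
    ∧ (∀ k', k' ∉ keys →
        (keys.foldl (fun st k =>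
          let v := st.1.getD k 0
          if v == 0 then st else (st.1.insert k (v - 1), pvAppendAt st.2 (v - 1) k))
        (d, res)).1.getD k' 0 = d.getD k' 0)
    ∧ (∀ k ∈ keys,
        (keys.foldl (fun st k =>
          let v := st.1.getD k 0
          if v == 0 then st else (st.1.insert k (v - 1), pvAppendAt st.2 (v - 1) k))
        (d, res)).1.getD k 0 = if f k = 0 then 0 else f k - 1)
    ∧ (keys.foldl (fun st k =>
        let v := st.1.getD k 0
        if v == 0 then st else (st.1.insert k (v - 1), pvAppendAt st.2 (v - 1) k))
      (d, res)).2
      = keys.foldl (fun r k => if f k = 0 then r else pvAppendAt r (f k - 1) k) res := by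
  induction keys generalizing d res with
  | nil => simp
  | cons a keys ih =>
    have hna : a ∉ keys := (List.nodup_cons.mp hnd).1
    have hnd' : keys.Nodup := (List.nodup_cons.mp hnd).2
    have hfa : d.getD a 0 = f a := hf a (by simp)
    by_cases h0 : f a = 0
    · -- head skipped
      have hv : (d.getD a 0 == (0:Int)) = true := by simp [hfa, h0]
      obtain ⟨k1, k2, k3, k4⟩ := ih hnd' d res
        (fun k hk => hf k (by simp [hk])) (fun k hk => hc k (by simp [hk]))
      refine ⟨?_, ?_, ?_, ?_⟩ <;> simp only [List.foldl_cons, hv, if_pos, hfa, h0, beq_self_eq_true, if_true]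
      · exact k1
      · intro k' hk'; exact k2 k' (by simp at hk'; exact hk'.2)
      · intro k hk
        simp at hk
        rcases hk with rfl | hk
        · rw [k2 k hna, hfa, h0]; simp
        · rw [k3 k hk]
      · exact k4
    · -- head processed
      have hv : (d.getD a 0 == (0:Int)) = false := by simp [hfa, h0]
      have hca : d.contains a = true := hc a (by simp)
      have hkeys : (d.insert a (d.getD a 0 - 1)).keys = d.keys :=
        PySem.Dict.keys_insert_of_contains d _ hca
      obtain ⟨k1, k2, k3, k4⟩ := ih hnd' (d.insert a (d.getD a 0 - 1)) (pvAppendAt res (d.getD a 0 - 1) a)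
        (fun k hk => by
          rw [PySem.Dict.getD_insert_of_ne d _ _ (by rintro rfl; exact hna hk)]
          exact hf k (by simp [hk]))
        (fun k hk => by
          rw [PySem.Dict.contains_iff_mem_keys, hkeys, ← PySem.Dict.contains_iff_mem_keys]
          exact hc k (by simp [hk]))
      refine ⟨?_, ?_, ?_, ?_⟩ <;> simp only [List.foldl_cons, hv, if_neg, Bool.false_eq_true, not_false_iff, if_false]
      · rw [k1, hkeys]
      · intro k' hk'
        simp at hk'
        rw [k2 k' hk'.2, PySem.Dict.getD_insert_of_ne d _ _ (Ne.symm ?_)]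
        exact fun h => hk'.1 h.symm
      · intro k hk
        simp at hk
        rcases hk with rfl | hk
        · rw [k2 k hna, PySem.Dict.getD_insert_self, hfa]; simp [h0]
        · rw [k3 k hk]
      · rw [k4, hfa]
        simp [h0]

def pvPure (keys : List Int) : Nat → (Int → Int) → List (List Int) → List (List Int)
  | 0, _, res => res
  | n + 1, f, res =>
      pvPure keys n (fun k => if f k = 0 then 0 else f k - 1)
        (keys.foldl (fun r k => if f k = 0 then r else pvAppendAt r (f k - 1) k) res)

theorem pvFoldAppend_length2 {α : Type} (l : List α) (idx : α → Int) (val : α → Int)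
    (b : List (List Int)) :
    (l.foldl (fun b a => pvAppendAt b (idx a) (val a)) b).length = b.length := by
  induction l generalizing b with
  | nil => rfl
  | cons a l ih => simp [List.foldl_cons, ih, pvAppendAt_length]

theorem pvPass_eq_filter_fold (keys : List Int) (f : Int → Int) (res : List (List Int)) :
    keys.foldl (fun r k => if f k = 0 then r else pvAppendAt r (f k - 1) k) res
      = (keys.filter (fun k => !(f k == 0))).foldl (fun r k => pvAppendAt r (f k - 1) k) res := by
  induction keys generalizing res with
  | nil => rfl
  | cons a keys ih =>
    by_cases h : f a = 0 <;> simp [List.foldl_cons, h, ih]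

theorem pvPass_length (keys : List Int) (f : Int → Int) (res : List (List Int)) :
    (keys.foldl (fun r k => if f k = 0 then r else pvAppendAt r (f k - 1) k) res).length
      = res.length := by
  rw [pvPass_eq_filter_fold]
  exact pvFoldAppend_length2 _ _ _ _

theorem pvPass_getD (keys : List Int) (f : Int → Int) (res : List (List Int)) (j : Nat)
    (hj : j < res.length) (hb : ∀ k ∈ keys, 0 ≤ f k ∧ f k ≤ (res.length : Int)) :
    (keys.foldl (fun r k => if f k = 0 then r else pvAppendAt r (f k - 1) k) res).getD j []
      = res.getD j [] ++ keys.filter (fun k => f k == (j : Int) + 1) := by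
  rw [pvPass_eq_filter_fold,
    pvFoldAppend_getD (keys.filter (fun k => !(f k == 0))) (fun k => f k - 1) (fun k => k) res j hj
      (by
        intro k hk
        simp only [List.mem_filter, Bool.not_eq_eq_eq_not, Bool.not_true, beq_eq_false_iff_ne,
          ne_eq] at hk
        obtain ⟨h0, h1⟩ := hb k hk.1
        dsimp only
        constructor <;> omega)]
  rw [List.filter_filter, List.map_id']
  congr 1
  apply List.filter_congr
  intro k _
  rw [Bool.eq_iff_iff]
  simp
  omega

theorem pvPure_length (keys : List Int) (n : Nat) (f : Int → Int) (res : List (List Int)) :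
    (pvPure keys n f res).length = res.length := by
  induction n generalizing f res with
  | zero => rfl
  | succ n ih => rw [pvPure, ih, pvPass_length]

theorem pvPure_getD (keys : List Int) (n : Nat) (f : Int → Int) (res : List (List Int)) (j : Nat)
    (hj : j < res.length) (hb : ∀ k ∈ keys, 0 ≤ f k ∧ f k ≤ (res.length : Int)) :
    (pvPure keys n f res).getD j []
      = res.getD j []
        ++ (List.range n).flatMap (fun (p : Nat) => keys.filter (fun k => f k == (p : Int) + j + 1)) := by
  induction n generalizing f res with
  | zero => simp [pvPure]
  | succ n ih =>
    rw [pvPure, ih _ _ (by rw [pvPass_length]; exact hj)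
      (by
        intro k hk
        obtain ⟨h0, h1⟩ := hb k hk
        rw [pvPass_length]
        constructor <;> [skip; skip] <;> by_cases h : f k = 0 <;> simp [h] <;> omega)]
    rw [pvPass_getD keys f res j hj hb]
    rw [List.append_assoc]
    congr 1
    rw [List.range_succ_eq_map]
    rw [List.flatMap_cons, List.flatMap_map]
    congr 1
    · simp
    · apply List.flatMap_congr
      intro p _
      apply List.filter_congr
      intro k _
      rw [Bool.eq_iff_iff]
      simp
      constructor <;> intro h
      · split at h <;> omega
      · have hp : (0:Int) ≤ (p:Int) := by positivity
        split <;> omega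

theorem pvWhileA_pure (n : Nat) (keys : List Int) (hnd : keys.Nodup)
    (d : PySem.Dict Int Int) (res : List (List Int)) (f : Int → Int)
    (hk : d.keys = keys) (hf : ∀ k ∈ keys, d.getD k 0 = f k) :
    (pvWhileA n (d, res)).2 = pvPure keys n f res := by
  induction n generalizing d res f with
  | zero => rfl
  | succ n ih =>
    have hc : ∀ k ∈ keys, d.contains k = true := by
      intro k hkk
      rw [PySem.Dict.contains_iff_mem_keys, hk]
      exact hkk
    obtain ⟨k1, k2, k3, k4⟩ := pvFoldPass keys hnd d res f hf hc
    rw [pvWhileA, pvPure]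
    have hpass : pvPassA (d, res)
        = (keys.foldl (fun st k =>
            let v := st.1.getD k 0
            if v == 0 then st
            else (st.1.insert k (v - 1), pvAppendAt st.2 (v - 1) k)) (d, res)) := by
      rw [pvPassA, hk]
    rcases hEq : keys.foldl (fun st k =>
        let v := st.1.getD k 0
        if v == 0 then st
        else (st.1.insert k (v - 1), pvAppendAt st.2 (v - 1) k)) (d, res) with ⟨d', res'⟩
    rw [hEq] at k1 k2 k3 k4
    rw [hpass, hEq]
    rw [ih d' res' (fun k => if f k = 0 then 0 else f k - 1) (by rw [k1, hk]) k3]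
    exact congrArg (pvPure keys n fun k => if f k = 0 then 0 else f k - 1) k4

theorem pvLoopB (g : Int → List Int) (m : Nat) (rows : List (List Int)) (a : List Int) :
    ((PySem.List.pyRange (m : Int) 0 (-1)).foldl
        (fun (st : List (List Int) × List Int) v =>
          let acc := g v ++ st.2
          (st.1 ++ [acc], acc)) (rows, a)).1
      = rows ++ (PySem.List.pyRange (m : Int) 0 (-1)).map
          (fun u => (PySem.List.pyRange u ((m : Int) + 1)).flatMap g ++ a) := by
  induction m generalizing rows a with
  | zero => simp [PySem.List.pyRange_neg_one_eq_nil]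
  | succ m ih =>
    rw [PySem.List.pyRange_neg_one_cons (by omega), List.foldl_cons]
    simp only []
    push_cast
    have h1 : (m:Int) + 1 - 1 = (m:Int) := by ring
    rw [h1]
    rw [ih (rows ++ [g ((m:Int)+1) ++ a]) (g ((m:Int)+1) ++ a)]
    rw [List.map_cons, List.append_assoc]
    congr 1
    rw [List.singleton_append]
    congr 1
    · have : (m:Int) + 1 + 1 = ((m:Int)+1) + 1 := by ring
      rw [this, PySem.List.pyRange_one_singleton]
      simp
    · apply List.map_congr_left
      intro u hu
      rw [PySem.List.mem_pyRange_neg_one] at hu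
      have : PySem.List.pyRange u ((m:Int) + 1 + 1) = PySem.List.pyRange u ((m:Int)+1) ++ [(m:Int)+1] :=
        PySem.List.pyRange_one_succ_right (by omega)
      rw [this, List.flatMap_append]
      simp

def pvBkt (nums : List Int) (v : Int) : List Int :=
  (PySem.Set.ofList nums).filter (fun k => (nums.count k : Int) == v)

def pvRow (nums : List Int) (maxc j : Int) : List Int :=
  (PySem.List.pyRange (j + 1) (maxc + 1)).flatMap (pvBkt nums)

def pvRows (nums : List Int) (maxc : Int) : List (List Int) :=
  (PySem.List.pyRange 0 maxc).map (pvRow nums maxc)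

def pvMax (nums : List Int) : Int :=
  (PySem.List.max? (PySem.Dict.counter nums).values (fun v => v)).getD 0

theorem pvValues_eq (nums : List Int) :
    (PySem.Dict.counter nums).values
      = (PySem.Set.ofList nums).map (fun k => (nums.count k : Int)) := by
  rw [PySem.Dict.values_eq_map_keys _ (PySem.Dict.nodup_keys_counter nums) 0,
    PySem.Dict.keys_counter]
  apply List.map_congr_left
  intro k _
  exact PySem.Dict.getD_counter nums k

theorem pvMax_ge_one (nums : List Int) (h : nums ≠ []) : 1 ≤ pvMax nums := by
  rcases nums with _ | ⟨x, t⟩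
  · exact absurd rfl h
  · have hmem : x ∈ PySem.Set.ofList (x :: t) := by
      rw [PySem.Set.mem_ofList]; simp
    have hvne : (PySem.Dict.counter (x :: t)).values ≠ [] := by
      rw [pvValues_eq]
      intro hc
      rw [List.map_eq_nil_iff] at hc
      rw [hc] at hmem
      exact absurd hmem (List.not_mem_nil)
    rcases hm : PySem.List.max? (PySem.Dict.counter (x :: t)).values (fun v => v) with _ | m
    · exact absurd ((PySem.List.max?_eq_none_iff _ _).mp hm) hvne
    · have hmmem := PySem.List.max?_mem hm
      rw [pvValues_eq] at hmmem
      rw [List.mem_map] at hmmem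
      obtain ⟨k, hk, hkeq⟩ := hmmem
      rw [PySem.Set.mem_ofList] at hk
      have : 0 < (x :: t).count k := List.count_pos_iff.mpr hk
      rw [pvMax, hm]
      simp only [Option.getD_some]
      omega

theorem pvCount_le_max (nums : List Int) {k : Int} (hk : k ∈ PySem.Set.ofList nums) :
    (nums.count k : Int) ≤ pvMax nums := by
  have hvmem : (nums.count k : Int) ∈ (PySem.Dict.counter nums).values := by
    rw [pvValues_eq]
    exact List.mem_map.mpr ⟨k, hk, rfl⟩
  rcases hm : PySem.List.max? (PySem.Dict.counter nums).values (fun v => v) with _ | m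
  · rw [(PySem.List.max?_eq_none_iff _ _).mp hm] at hvmem
    exact absurd hvmem (List.not_mem_nil)
  · have := PySem.List.max?_isMax hm _ hvmem
    rw [pvMax, hm]
    simpa using this

theorem pvMax_nonneg (nums : List Int) : 0 ≤ pvMax nums := by
  rcases hm : PySem.List.max? (PySem.Dict.counter nums).values (fun v => v) with _ | m
  · simp [pvMax, hm]
  · have := PySem.List.max?_mem hm
    rw [pvValues_eq, List.mem_map] at this
    obtain ⟨k, _, hkeq⟩ := this
    rw [pvMax, hm]
    simp only [Option.getD_some]
    omega

theorem pvBuckets_len (nums : List Int) :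
    ((PySem.List.pyRange 0 (pvMax nums + 1)).map (fun _ => ([] : List Int))).length
      = (pvMax nums + 1).toNat := by
  rw [List.length_map, PySem.List.length_pyRange_one]
  simp

theorem pvBuckets_getD (nums : List Int) (v : Nat) (hv : v < (pvMax nums + 1).toNat) :
    ((PySem.Dict.counter nums).items.foldl (fun b p => pvAppendAt b p.2 p.1)
        ((PySem.List.pyRange 0 (pvMax nums + 1)).map (fun _ => ([] : List Int)))).getD v []
      = pvBkt nums (v : Int) := by
  rw [PySem.Dict.items_counter, List.foldl_map]
  rw [pvFoldAppend_getD (PySem.Set.ofList nums) (fun k => (nums.count k : Int)) (fun k => k) _ v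
    (by rw [pvBuckets_len]; exact hv)
    (by
      intro k hk
      have h1 := pvCount_le_max nums hk
      rw [pvBuckets_len]
      have h2 := pvMax_nonneg nums
      dsimp only
      exact ⟨Int.natCast_nonneg _, by omega⟩)]
  rw [List.map_const', List.getD_replicate]
  · simp [pvBkt]
  · rw [PySem.List.length_pyRange_one]
    simpa using hv


theorem pvB_char (nums : List Int) (h : nums ≠ []) :
    solution_alt nums = pvRows nums (pvMax nums) := by
  have hM1 : 1 ≤ pvMax nums := pvMax_ge_one nums h
  have hMnat : ((pvMax nums).toNat : Int) = pvMax nums := Int.toNat_of_nonneg (by omega)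
  unfold solution_alt
  simp only []
  rw [show PySem.List.maxD (PySem.Dict.counter nums).values (fun v => v) 0 = pvMax nums from rfl]
  set bks := (PySem.Dict.counter nums).items.foldl (fun b p => pvAppendAt b p.2 p.1)
      ((PySem.List.pyRange 0 (pvMax nums + 1)).map (fun _ => ([] : List Int))) with hbks
  have hget : ∀ u : Int, 0 ≤ u → u < pvMax nums + 1 →
      PySem.List.pyGetD bks u [] = pvBkt nums u := by
    intro u hu0 hu1
    have hu : u = ((u.toNat : Nat) : Int) := by omega
    rw [hu, PySem.List.pyGetD_natCast, hbks]
    exact pvBuckets_getD nums u.toNat (by omega)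
  rw [← hMnat]
  rw [pvLoopB (fun v => PySem.List.pyGetD bks v []) ((pvMax nums).toNat) [] []]
  rw [List.nil_append]
  rw [PySem.List.pyRange_neg_one_eq_reverse, List.map_reverse, List.reverse_reverse]
  rw [pvRows]
  rw [show ((0:Int) + 1) = 1 from rfl]
  rw [PySem.List.pyRange_one 1, PySem.List.pyRange_one 0]
  simp only [List.map_map]
  have hlen : ((pvMax nums).toNat + 1 - 1 : Int).toNat = ((pvMax nums).toNat - 0 : Int).toNat := by
    omega
  rw [hlen]
  apply List.map_congr_left
  intro t ht
  rw [List.mem_range] at ht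
  simp only [Function.comp]
  have harg : (0 : Int) + (t : Int) + 1 = 1 + (t : Int) := by ring
  rw [pvRow, harg]
  rw [List.append_nil]
  have hm2 : ((pvMax nums).toNat : Int) - 0 = ((pvMax nums).toNat : Int) := by ring
  rw [hm2] at ht
  apply List.flatMap_congr
  intro u hu
  rw [PySem.List.mem_pyRange_one] at hu
  exact hget u (by omega) (by omega)

theorem pvNodup_of_len (l : List Int) (h : (PySem.Set.ofList l).length = l.length) : l.Nodup := by
  have hts : (PySem.Set.ofList l).toFinset = l.toFinset := by
    apply Finset.ext
    intro a
    simp [PySem.Set.mem_ofList]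
  have hcard : l.toFinset.card = l.length := by
    rw [← hts, List.toFinset_card_of_nodup (PySem.Set.nodup_ofList l), h]
  rw [List.card_toFinset] at hcard
  rw [← List.Sublist.eq_of_length (List.dedup_sublist l) hcard]
  exact l.nodup_dedup

theorem pvMax_of_nodup (nums : List Int) (h : nums ≠ []) (hnd : nums.Nodup) :
    pvMax nums = 1 := by
  rcases hm : PySem.List.max? (PySem.Dict.counter nums).values (fun v => v) with _ | m
  · have h1 := pvMax_ge_one nums h
    rw [pvMax, hm] at h1
    simp at h1
  · have hmem := PySem.List.max?_mem hm
    rw [pvValues_eq, List.mem_map] at hmem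
    obtain ⟨k, hk, hkeq⟩ := hmem
    rw [PySem.Set.mem_ofList] at hk
    rw [pvMax, hm, Option.getD_some, ← hkeq, List.count_eq_one_of_mem hnd hk]
    rfl

theorem pvRows_of_nodup (nums : List Int) (h : nums ≠ []) (hnd : nums.Nodup) :
    pvRows nums (pvMax nums) = [nums] := by
  rw [pvMax_of_nodup nums h hnd, pvRows]
  rw [show PySem.List.pyRange 0 1 = [0] from by decide]
  rw [List.map_singleton, pvRow]
  rw [show PySem.List.pyRange (0 + 1) (1 + 1) = [1] from by decide]
  rw [List.flatMap_cons, List.flatMap_nil, List.append_nil]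
  rw [pvBkt, PySem.Set.ofList_eq_self_of_nodup nums hnd]
  congr 1
  rw [List.filter_eq_self]
  intro k hk
  simp [List.count_eq_one_of_mem hnd hk]

theorem pvRange_flat (nums : List Int) (j : Nat) (_hj : j < (pvMax nums).toNat) :
    (List.range ((pvMax nums + 1).toNat)).flatMap
        (fun (p : Nat) => (PySem.Set.ofList nums).filter
          (fun k => (nums.count k : Int) == (p : Int) + (j : Int) + 1))
      = pvRow nums (pvMax nums) (j : Int) := by
  have hM0 : 0 ≤ pvMax nums := pvMax_nonneg nums
  have hK : (pvMax nums + 1).toNat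
      = (pvMax nums - j).toNat + ((pvMax nums + 1).toNat - (pvMax nums - j).toNat) := by omega
  rw [hK, List.range_add, List.flatMap_append, List.flatMap_map]
  have h2 : (List.range ((pvMax nums + 1).toNat - (pvMax nums - (j:Int)).toNat)).flatMap
      (fun a => (PySem.Set.ofList nums).filter
        (fun k => (nums.count k : Int)
          == ((((pvMax nums - (j:Int)).toNat + a : Nat)) : Int) + (j:Int) + 1)) = [] := by
    apply List.flatMap_eq_nil_iff.mpr
    intro t _
    apply List.filter_eq_nil_iff.mpr
    intro k hk
    have hc := pvCount_le_max nums hk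
    simp only [beq_iff_eq]
    push_cast
    omega
  rw [h2, List.append_nil]
  rw [pvRow, PySem.List.pyRange_one ((j:Int) + 1) (pvMax nums + 1), List.flatMap_map]
  have hlen : (pvMax nums + 1 - ((j:Int) + 1)).toNat = (pvMax nums - (j:Int)).toNat := by omega
  rw [hlen]
  apply List.flatMap_congr
  intro t _
  rw [pvBkt]
  apply List.filter_congr
  intro k _
  rw [Bool.eq_iff_iff]
  simp only [beq_iff_eq]
  constructor <;> intro h <;> omega


theorem pvA_general (nums : List Int)
    (hc : ¬ (PySem.Set.len (PySem.Set.ofList nums) == (nums.length : Int)) = true) :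
    solution nums = pvRows nums (pvMax nums) := by
  have hne : nums ≠ [] := by
    rintro rfl
    exact hc (by decide)
  have hM1 : 1 ≤ pvMax nums := pvMax_ge_one nums hne
  have hMnat : ((pvMax nums).toNat : Int) = pvMax nums := Int.toNat_of_nonneg (by omega)
  unfold solution
  rw [if_neg hc]
  simp only []
  rw [show (PySem.List.max? (PySem.Dict.counter nums).values (fun v => v)).getD 0
    = pvMax nums from rfl]
  rw [pvWhileA_pure ((pvMax nums + 1).toNat) (PySem.Set.ofList nums)
    (PySem.Set.nodup_ofList nums) (PySem.Dict.counter nums)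
    ((PySem.List.pyRange 0 (pvMax nums)).map (fun _ => []))
    (fun k => ((nums.count k : Nat) : Int))
    (PySem.Dict.keys_counter nums)
    (fun k _ => PySem.Dict.getD_counter nums k)]
  have hres0len : ((PySem.List.pyRange 0 (pvMax nums)).map
      (fun _ => ([] : List Int))).length = (pvMax nums).toNat := by
    rw [List.length_map, PySem.List.length_pyRange_one]
    simp
  apply List.ext_getElem
  · rw [pvPure_length, hres0len, pvRows, List.length_map, PySem.List.length_pyRange_one]
    simp
  · intro j hj1 hj2
    rw [pvPure_length, hres0len] at hj1
    rw [← List.getD_eq_getElem _ [] _]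
    rw [pvPure_getD _ _ _ _ j (by rw [hres0len]; exact hj1)
      (by
        intro k hk
        have := pvCount_le_max nums hk
        rw [hres0len]
        exact ⟨Int.natCast_nonneg _, by omega⟩)]
    rw [List.map_const', List.getD_replicate, List.nil_append]
    rw [pvRange_flat nums j hj1]
    simp only [pvRows]
    rw [List.getElem_map, PySem.List.getElem_pyRange_one]
    rw [show (0 : Int) + (j : Int) = (j : Int) from by ring]
    rw [PySem.List.length_pyRange_one]
    omega

-- ===== VERDICT (by name: the statement is the Claim_ definition above) =====
theorem solution_spec : Claim_equal_solution := by
  intro nums _ hpre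
  unfold Spec_solution
  by_cases hcond : (PySem.Set.len (PySem.Set.ofList nums) == (nums.length : Int)) = true
  · have hlen : (PySem.Set.ofList nums).length = nums.length := by
      simpa [PySem.Set.len] using hcond
    have hnd := pvNodup_of_len nums hlen
    rw [pvB_char nums hpre, pvRows_of_nodup nums hpre hnd]
    unfold solution
    rw [if_pos hcond]
  · rw [pvA_general nums hcond, pvB_char nums hpre]
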